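-- pv_equiv track=rewrite | github.com/GutesBrot/AdventOfCode2024 | 09/D9_2.py | get_free_segments
-- ===== SOURCE A (Python) =====
-- def get_free_segments(disk):
--     """
--     Identify and return a list of free segments as (start, length).
--     """
--     free_segments = []
--     n = len(disk)
--     i = 0
--     while i < n:
--         if disk[i] == '.':
--             start = i
--             while i < n and disk[i] == '.':
--                 i += 1
--             length = i - start
--             free_segments.append((start, length))
--         else:
--             i += 1
--     return free_segments
-- ===== SOURCE B (Python) =====
-- def get_free_segments(disk):
--     """
--     Identify and return a list of free segments as (start, length).
--     """
--     dots = [i for i, c in enumerate(disk) if c == '.']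
--     segs = []
--     for i in dots:
--         if segs and i == segs[-1][0] + segs[-1][1]:
--             segs[-1] = (segs[-1][0], segs[-1][1] + 1)
--         else:
--             segs.append((i, 1))
--     return segs
-- ===== Notes on version B (the rewrite author's own statement) =====
-- stated objective: alternative
-- what changed: Replaced A's nested while-loop scan by a two-stage pipeline: first collect the indices of all '.' cells with a comprehension over enumerate, then fold over that index list merging adjacent indices into the last (start, length) segment or starting a new one.
import Mathlib
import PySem

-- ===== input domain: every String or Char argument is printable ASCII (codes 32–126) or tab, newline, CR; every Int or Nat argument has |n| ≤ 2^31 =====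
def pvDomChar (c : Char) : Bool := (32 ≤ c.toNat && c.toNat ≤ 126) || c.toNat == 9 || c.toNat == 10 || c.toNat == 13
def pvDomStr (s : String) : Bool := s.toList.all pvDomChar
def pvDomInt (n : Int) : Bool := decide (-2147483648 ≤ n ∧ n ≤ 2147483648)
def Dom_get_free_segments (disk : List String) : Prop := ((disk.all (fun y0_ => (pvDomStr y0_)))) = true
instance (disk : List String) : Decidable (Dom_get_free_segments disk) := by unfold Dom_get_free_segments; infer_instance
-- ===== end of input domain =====

-- B replaces A's nested while-loop scan by two stages: first collect the indices of
-- all '.' cells, then fold over that index list merging adjacent indices into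
-- (start, length) segments (objective: alternative decomposition).

-- ===== PORT A =====
-- inner while loop: 'while i < n and disk[i] == ".": i += 1'; returns the final i
def pvAInner (disk : List String) (n i : Nat) : Nat :=
  if i < n ∧ disk.getD i "" = "." then pvAInner disk n (i + 1) else i
termination_by n - i

-- termination helper for pvALoop: the inner while loop never moves i backwards
lemma pvAInner_ge (disk : List String) (n i : Nat) : i ≤ pvAInner disk n i := by
  unfold pvAInner
  split
  · have := pvAInner_ge disk n (i + 1); omega
  · exact Nat.le_refl i
termination_by n - i
decreasing_by omega

-- outer while loop with accumulator free_segments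
def pvALoop (disk : List String) (n i : Nat) (acc : List (Int × Int)) :
    List (Int × Int) :=
  if _h : i < n then
    if disk.getD i "" = "." then
      -- start = i; inner while (first iteration already checked true, so enter at i+1)
      let j := pvAInner disk n (i + 1)
      pvALoop disk n j (acc ++ [((i : Int), ((j - i : Nat) : Int))])
    else
      pvALoop disk n (i + 1) acc
  else acc
termination_by n - i
decreasing_by
  · have : i + 1 ≤ pvAInner disk n (i + 1) := pvAInner_ge disk n (i + 1)
    omega
  · omega

def get_free_segments (disk : List String) : List (Int × Int) :=
  pvALoop disk disk.length 0 []

-- ===== PORT B =====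
-- one step of the 'for i in dots' loop: merge into the last segment or start a new one
def pvBStep (segs : List (Int × Int)) (i : Int) : List (Int × Int) :=
  match segs.getLast? with
  | some (s, l) =>
      if i = s + l then segs.dropLast ++ [(s, l + 1)]   -- segs[-1] = (s, l+1)
      else segs ++ [(i, 1)]
  | none => [(i, 1)]                                     -- segs empty: append (i, 1)

def get_free_segments_alt (disk : List String) : List (Int × Int) :=
  -- dots = [i for i, c in enumerate(disk) if c == '.']
  let dots := ((PySem.List.enumerate disk).filter (fun p => p.2 == ".")).map (·.1)
  dots.foldl pvBStep []

-- ===== PRECONDITION & SPEC =====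
def Spec_get_free_segments (disk : List String) (out : List (Int × Int)) : Prop := out = get_free_segments_alt disk
instance (disk : List String) (out : List (Int × Int)) : Decidable (Spec_get_free_segments disk out) := by unfold Spec_get_free_segments; infer_instance

-- ===== CLAIM (what is proved, stated in full; the proofs are below) =====
def Claim_equal_get_free_segments : Prop := ∀ (disk : List String), Dom_get_free_segments disk → Spec_get_free_segments disk (get_free_segments disk)

-- ===== LEMMAS AND PROOFS =====

-- canonical middle form: one recursive pass over maximal runs (proof-side only)
def pvBGo (pos : Int) (l : List String) : List (Int × Int) :=
  match l with
  | [] => []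
  | x :: rest =>
    let g := rest.takeWhile (· == x)
    let len : Int := 1 + g.length
    let rest' := rest.drop g.length
    if x = "." then (pos, len) :: pvBGo (pos + len) rest'
    else pvBGo (pos + len) rest'
termination_by l.length
decreasing_by
  all_goals simp only [List.length_drop, List.length_cons]; omega

-- the list of indices (offset p) of the '.' cells, in order (proof-side mirror of B's dots)
def pvDots (p : Int) : List String → List Int
  | [] => []
  | x :: r => if x = "." then p :: pvDots (p + 1) r else pvDots (p + 1) r

-- the run of consecutive integers e, e+1, …, e+j-1
def pvRun (e : Int) : Nat → List Int
  | 0 => []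
  | j + 1 => e :: pvRun (e + 1) j

-- one-step unfolding of pvBGo on a cons cell
lemma pvBGo_cons (pos : Int) (x : String) (rest : List String) :
    pvBGo pos (x :: rest)
      = (if x = "."
          then ((pos, (1 + ((rest.takeWhile (· == x)).length : Int))) :: pvBGo (pos + (1 + ((rest.takeWhile (· == x)).length : Int))) (rest.drop (rest.takeWhile (· == x)).length))
          else pvBGo (pos + (1 + ((rest.takeWhile (· == x)).length : Int))) (rest.drop (rest.takeWhile (· == x)).length)) := by
  rw [pvBGo]

-- index form of disk.getD inside the scanned range
lemma pvGetD_eq (disk : List String) (i : Nat) (hi : i < disk.length) :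
    disk.getD i "" = disk[i] := by
  simp [List.getD_eq_getElem?_getD, List.getElem?_eq_getElem hi]

-- A's inner while loop measures the '.'-run starting at i
lemma pvAInner_eq (disk : List String) (i : Nat) :
    pvAInner disk disk.length i
      = i + ((disk.drop i).takeWhile (· == ".")).length := by
  rw [pvAInner]
  by_cases h : i < disk.length ∧ disk.getD i "" = "."
  · rw [if_pos h]
    rw [pvAInner_eq disk (i + 1)]
    have hcons : disk.drop i = disk[i] :: disk.drop (i + 1) :=
      List.drop_eq_getElem_cons h.1
    have hx : disk[i] = "." := by rw [← pvGetD_eq disk i h.1]; exact h.2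
    rw [hcons, hx]
    simp
    omega
  · rw [if_neg h]
    by_cases hi : i < disk.length
    · have hcons : disk.drop i = disk[i] :: disk.drop (i + 1) :=
        List.drop_eq_getElem_cons hi
      have hx : ¬ disk[i] = "." := by
        intro hh; exact h ⟨hi, by rw [pvGetD_eq disk i hi]; exact hh⟩
      rw [hcons]
      simp [hx]
    · rw [List.drop_eq_nil_of_le (by omega)]
      simp
termination_by disk.length - i
decreasing_by omega

-- B's middle form silently absorbs a non-'.' element
lemma pvBGo_skip (x : String) (hx : ¬ x = ".") (i : Int) (rest : List String) :
    pvBGo i (x :: rest) = pvBGo (i + 1) rest := by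
  rw [pvBGo_cons, if_neg hx]
  cases rest with
  | nil => simp [pvBGo]
  | cons y rs =>
    by_cases hy : y = x
    · subst hy
      rw [pvBGo_cons, if_neg hx]
      simp only [List.takeWhile_cons, beq_self_eq_true, if_true, List.length_cons,
        List.drop_succ_cons]
      congr 1
      push_cast
      ring
    · have : (y :: rs).takeWhile (· == x) = [] := by
        simp [hy]
      rw [this]
      simp

-- invariant linking A to the middle form: A's outer loop from i = groupby pass on the suffix
lemma pvALoop_eq (disk : List String) (i : Nat) (acc : List (Int × Int)) :
    pvALoop disk disk.length i acc = acc ++ pvBGo (i : Int) (disk.drop i) := by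
  rw [pvALoop]
  by_cases hi : i < disk.length
  · rw [dif_pos hi]
    have hcons : disk.drop i = disk[i] :: disk.drop (i + 1) :=
      List.drop_eq_getElem_cons hi
    by_cases hdot : disk.getD i "" = "."
    · rw [if_pos hdot]
      have hx : disk[i] = "." := by rw [← pvGetD_eq disk i hi]; exact hdot
      have hj := pvAInner_eq disk (i + 1)
      rw [pvALoop_eq disk (pvAInner disk disk.length (i + 1)) _]
      rw [hj, hcons, hx, pvBGo_cons, if_pos rfl]
      rw [List.drop_drop]
      have e1 : ((i + 1 + ((disk.drop (i + 1)).takeWhile (· == ".")).length - i : Nat) : Int)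
          = 1 + (((disk.drop (i + 1)).takeWhile (· == ".")).length : Int) := by omega
      have e2 : ((i + 1 + ((disk.drop (i + 1)).takeWhile (· == ".")).length : Nat) : Int)
          = (i : Int) + (1 + (((disk.drop (i + 1)).takeWhile (· == ".")).length : Int)) := by
        push_cast; ring
      rw [e1, e2]
      simp [List.append_assoc]
    · rw [if_neg hdot]
      rw [pvALoop_eq disk (i + 1) acc]
      have hx : ¬ disk[i] = "." := by
        intro hh; exact hdot (by rw [pvGetD_eq disk i hi]; exact hh)
      rw [hcons, pvBGo_skip disk[i] hx]
      norm_cast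
  · rw [dif_neg hi]
    rw [List.drop_eq_nil_of_le (by omega)]
    simp [pvBGo]
termination_by disk.length - i
decreasing_by
  · omega
  · omega

-- B's dots comprehension equals pvDots
lemma pvDots_eq (l : List String) (s : Int) :
    ((PySem.List.enumerate l s).filter (fun p => p.2 == ".")).map (·.1) = pvDots s l := by
  induction l generalizing s with
  | nil => simp [PySem.List.enumerate, pvDots]
  | cons x r ih =>
    rw [PySem.List.enumerate_cons, pvDots]
    by_cases hx : x = "."
    · simp [hx, ih]
    · simp [hx, ih]

-- every dot index is at least the offset
lemma pvDots_ge (l : List String) (p : Int) : ∀ i ∈ pvDots p l, p ≤ i := by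
  induction l generalizing p with
  | nil => simp [pvDots]
  | cons x r ih =>
    intro i hi
    rw [pvDots] at hi
    by_cases hx : x = "."
    · rw [if_pos hx] at hi
      rcases List.mem_cons.mp hi with h | h
      · omega
      · have := ih (p + 1) i h; omega
    · rw [if_neg hx] at hi
      have := ih (p + 1) i hi; omega

-- dots of an all-'.' prefix: a run of consecutive indices
lemma pvDots_dotgroup (g : List String) (hg : ∀ x ∈ g, x = ".") (q : Int) (t : List String) :
    pvDots q (g ++ t) = pvRun q g.length ++ pvDots (q + g.length) t := by
  induction g generalizing q with
  | nil => simp [pvRun]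
  | cons x r ih =>
    have hx : x = "." := hg x (by simp)
    rw [List.cons_append, pvDots, if_pos hx, List.length_cons, pvRun]
    rw [ih (fun y hy => hg y (by simp [hy])) (q + 1)]
    rw [List.cons_append]
    have e : q + 1 + (r.length : Int) = q + ((r.length + 1 : Nat) : Int) := by push_cast; ring
    rw [e]

-- the element just after the maximal takeWhile prefix fails the predicate
lemma pvDropTakeWhile_head (q : String → Bool) (l : List String) :
    ∀ y ∈ (l.drop ((l.takeWhile q).length)).head?, q y = false := by
  induction l with
  | nil => simp
  | cons x r ih =>
    by_cases hx : q x = true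
    · simpa [List.takeWhile_cons, hx] using ih
    · simp [hx]

-- a list splits as its takeWhile prefix plus the rest
lemma pvTakeWhile_split (q : String → Bool) (l : List String) :
    l = l.takeWhile q ++ l.drop ((l.takeWhile q).length) := by
  obtain ⟨t, ht⟩ := List.takeWhile_prefix (l := l) (p := q)
  set w := l.takeWhile q with hw
  have hd : l.drop w.length = t := by
    rw [← ht, List.drop_left]
  rw [hd, ht]

-- fold over a run of consecutive indices merges into the final segment
lemma pvFoldl_run (k : Nat) (acc0 : List (Int × Int)) (s l : Int) :
    List.foldl pvBStep (acc0 ++ [(s, l)]) (pvRun (s + l) k) = acc0 ++ [(s, l + (k : Int))] := by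
  induction k generalizing l with
  | zero => simp [pvRun]
  | succ k ih =>
    rw [pvRun, List.foldl_cons]
    have hstep : pvBStep (acc0 ++ [(s, l)]) (s + l) = acc0 ++ [(s, l + 1)] := by
      simp [pvBStep]
    rw [hstep]
    have e : s + l + 1 = s + (l + 1) := by ring
    rw [e, ih (l + 1)]
    have e2 : l + 1 + (k : Int) = l + ((k + 1 : Nat) : Int) := by push_cast; ring
    rw [e2]

-- a fresh dot opens a new segment when the accumulator's last segment ends before it
lemma pvBStep_fresh (acc : List (Int × Int)) (p : Int)
    (h : ∀ s l, acc.getLast? = some (s, l) → s + l < p) :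
    pvBStep acc p = acc ++ [(p, 1)] := by
  cases hlast : acc.getLast? with
  | none =>
    have hnil : acc = [] := List.getLast?_eq_none_iff.mp hlast
    subst hnil
    simp [pvBStep]
  | some sl =>
    obtain ⟨s, l⟩ := sl
    have hlt := h s l hlast
    have hne : ¬ p = s + l := by omega
    simp [pvBStep, hlast, hne]

-- main invariant: the merge fold over the dot indices equals the middle form
lemma pvFoldl_dots (disk : List String) (p : Int) (acc : List (Int × Int))
    (h : ∀ s l, acc.getLast? = some (s, l) → ∀ i ∈ pvDots p disk, s + l < i) :
    List.foldl pvBStep acc (pvDots p disk) = acc ++ pvBGo p disk := by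
  match disk with
  | [] => simp [pvDots, pvBGo]
  | x :: rest =>
    by_cases hx : x = "."
    · subst hx
      have hsplit := pvTakeWhile_split (· == ".") rest
      have hgdots : ∀ y ∈ rest.takeWhile (· == "."), y = "." := by
        intro y hy
        have := List.mem_takeWhile_imp hy
        simpa using this
      have hhead := pvDropTakeWhile_head (· == ".") rest
      set g := rest.takeWhile (· == ".") with hg
      set k := g.length with hk
      set rest' := rest.drop k with hrest'
      have hdots1 : pvDots p ("." :: rest)
          = p :: (pvRun (p + 1) k ++ pvDots (p + 1 + (k : Int)) rest') := by
        rw [pvDots, if_pos rfl]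
        conv_lhs => rw [hsplit]
        rw [pvDots_dotgroup g hgdots (p + 1) rest']
      have hpmem : p ∈ pvDots p ("." :: rest) := by rw [hdots1]; simp
      rw [hdots1, List.foldl_cons]
      rw [pvBStep_fresh acc p (fun s l hl => h s l hl p hpmem)]
      rw [List.foldl_append]
      rw [pvFoldl_run k acc p 1]
      have hrec : List.foldl pvBStep (acc ++ [(p, 1 + (k : Int))]) (pvDots (p + 1 + (k : Int)) rest')
          = (acc ++ [(p, 1 + (k : Int))]) ++ pvBGo (p + 1 + (k : Int)) rest' := by
        apply pvFoldl_dots rest' (p + 1 + (k : Int))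
        intro s l hl i hi
        have hlast : (acc ++ [(p, (1 : Int) + (k : Int))]).getLast? = some (p, (1 : Int) + (k : Int)) := by
          simp
        rw [hl] at hlast
        simp only [Option.some.injEq, Prod.mk.injEq] at hlast
        obtain ⟨hs, hll⟩ := hlast
        -- first element of rest' is not '.'; so its dots are ≥ p + k + 2
        cases hr' : rest' with
        | nil => rw [hr'] at hi; simp [pvDots] at hi
        | cons y t' =>
          have hy : ¬ y = "." := by
            intro hc
            have := hhead y (by rw [hr']; rfl)
            simp [hc] at this
          rw [hr', pvDots, if_neg hy] at hi
          have hge := pvDots_ge t' (p + 1 + (k : Int) + 1) i hi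
          omega
      rw [hrec]
      rw [pvBGo_cons, if_pos rfl, ← hg, ← hk, ← hrest']
      have e : p + (1 + (k : Int)) = p + 1 + (k : Int) := by ring
      rw [e]
      simp [List.append_assoc]
    · have hdots : pvDots p (x :: rest) = pvDots (p + 1) rest := by
        rw [pvDots, if_neg hx]
      rw [hdots, pvBGo_skip x hx]
      apply pvFoldl_dots rest (p + 1)
      intro s l hl i hi
      exact h s l hl i (by rw [hdots]; exact hi)
termination_by disk.length
decreasing_by
  · simp only [List.length_drop, List.length_cons]; omega
  · simp

-- ===== VERDICT (by name: the statement is the Claim_ definition above) =====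
theorem get_free_segments_spec : Claim_equal_get_free_segments := by
  intro disk _
  unfold Spec_get_free_segments get_free_segments get_free_segments_alt
  rw [pvDots_eq disk 0]
  rw [pvFoldl_dots disk 0 [] (by simp)]
  simpa using pvALoop_eq disk 0 []
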